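-- pv_equiv track=rewrite | github.com/NuryeNigusMekonen/DataContractEnforcer | contracts/report_generator.py | _result_status_counts
-- ===== SOURCE A (Python) =====
-- from typing import Any
--
-- def _result_status_counts(results: list[dict[str, Any]]) -> tuple[int, int, int]:
--     passed = 0
--     failed = 0
--     warned = 0
--     for result in results:
--         status = str(result.get("status", "")).upper()
--         if status == "PASS":
--             passed += 1
--         elif status in {"FAIL", "ERROR"}:
--             failed += 1
--         elif status == "WARN":
--             warned += 1
--     return passed, failed, warned
-- ===== SOURCE B (Python) =====
-- def _result_status_counts(results):
--     counts = {}
--     for result in results: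
--         s = str(result.get("status", "")).upper()
--         counts[s] = counts.get(s, 0) + 1
--     return (
--         counts.get("PASS", 0),
--         counts.get("FAIL", 0) + counts.get("ERROR", 0),
--         counts.get("WARN", 0),
--     )
-- ===== Notes on version B (the rewrite author's own statement) =====
-- stated objective: idiomatic
-- what changed: Replaces the per-item if/elif classification with a branch-free frequency-table loop (a dict counter over the normalized statuses) and reads PASS / FAIL+ERROR / WARN off the table at the end.
import Mathlib
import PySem

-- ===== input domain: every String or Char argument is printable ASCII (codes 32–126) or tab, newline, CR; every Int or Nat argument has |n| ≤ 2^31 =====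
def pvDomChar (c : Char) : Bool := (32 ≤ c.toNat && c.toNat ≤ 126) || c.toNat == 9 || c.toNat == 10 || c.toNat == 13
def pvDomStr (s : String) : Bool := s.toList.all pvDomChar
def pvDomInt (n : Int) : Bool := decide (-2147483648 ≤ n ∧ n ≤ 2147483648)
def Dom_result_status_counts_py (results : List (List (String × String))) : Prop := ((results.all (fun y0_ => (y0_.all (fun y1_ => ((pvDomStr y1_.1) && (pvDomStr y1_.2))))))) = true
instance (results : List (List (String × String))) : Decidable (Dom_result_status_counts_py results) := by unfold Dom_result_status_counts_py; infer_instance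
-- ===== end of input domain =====

-- B replaces A's per-item if/elif classification by a branch-free frequency-table
-- loop plus a final read-off of the PASS / FAIL+ERROR / WARN entries (idiomatic).

-- ===== PORT A =====
def result_status_counts_py (results : List (List (String × String))) : Int × Int × Int :=
  results.foldl
    (fun (acc : Int × Int × Int) result =>
      let status := PySem.Str.upper ((PySem.Dict.mk result).getD "status" "")
      if status = "PASS" then (acc.1 + 1, acc.2.1, acc.2.2)
      else if status = "FAIL" ∨ status = "ERROR" then (acc.1, acc.2.1 + 1, acc.2.2)
      else if status = "WARN" then (acc.1, acc.2.1, acc.2.2 + 1)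
      else acc)
    (0, 0, 0)

-- ===== PORT B =====
def result_status_counts_py_alt (results : List (List (String × String))) : Int × Int × Int :=
  let counts := results.foldl
    (fun (d : PySem.Dict String Int) result =>
      let s := PySem.Str.upper ((PySem.Dict.mk result).getD "status" "")
      d.insert s (d.getD s 0 + 1))
    PySem.Dict.empty
  (counts.getD "PASS" 0, counts.getD "FAIL" 0 + counts.getD "ERROR" 0, counts.getD "WARN" 0)

-- ===== PRECONDITION & SPEC =====
def Spec_result_status_counts_py (results : List (List (String × String))) (out : Int × Int × Int) : Prop := out = result_status_counts_py_alt results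
instance (results : List (List (String × String))) (out : Int × Int × Int) : Decidable (Spec_result_status_counts_py results out) := by unfold Spec_result_status_counts_py; infer_instance

-- ===== CLAIM (what is proved, stated in full; the proofs are below) =====
def Claim_equal_result_status_counts_py : Prop := ∀ (results : List (List (String × String))), Dom_result_status_counts_py results → Spec_result_status_counts_py results (result_status_counts_py results)

-- ===== LEMMAS AND PROOFS =====

-- the normalized status of one result row
def pvNorm (result : List (String × String)) : String :=
  PySem.Str.upper ((PySem.Dict.mk result).getD "status" "")

-- A's fold over statuses, characterized by the status counts
set_option maxHeartbeats 1000000 in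
lemma afold_counts (ss : List String) (p f w : Int) :
    ss.foldl
      (fun (acc : Int × Int × Int) status =>
        if status = "PASS" then (acc.1 + 1, acc.2.1, acc.2.2)
        else if status = "FAIL" ∨ status = "ERROR" then (acc.1, acc.2.1 + 1, acc.2.2)
        else if status = "WARN" then (acc.1, acc.2.1, acc.2.2 + 1)
        else acc) (p, f, w)
    = (p + ss.count "PASS", f + ss.count "FAIL" + ss.count "ERROR", w + ss.count "WARN") := by
  induction ss generalizing p f w with
  | nil => simp
  | cons s t ih =>
    simp only [List.foldl_cons, List.count_cons]
    split_ifs with h1 h2 h3 <;> rw [ih] <;>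
      refine Prod.ext ?_ (Prod.ext ?_ ?_) <;>
        simp_all <;> omega

theorem result_status_counts_py_spec : Claim_equal_result_status_counts_py := by
  intro results _
  unfold Spec_result_status_counts_py result_status_counts_py result_status_counts_py_alt
  show _ = _
  have hA :
      results.foldl
        (fun (acc : Int × Int × Int) result =>
          let status := pvNorm result
          if status = "PASS" then (acc.1 + 1, acc.2.1, acc.2.2)
          else if status = "FAIL" ∨ status = "ERROR" then (acc.1, acc.2.1 + 1, acc.2.2)
          else if status = "WARN" then (acc.1, acc.2.1, acc.2.2 + 1)
          else acc) ((0 : Int), (0 : Int), (0 : Int))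
      = (((results.map pvNorm).count "PASS" : Int),
         ((results.map pvNorm).count "FAIL" : Int) + ((results.map pvNorm).count "ERROR" : Int),
         ((results.map pvNorm).count "WARN" : Int)) := by
    have : ((results.map pvNorm).foldl
        (fun (acc : Int × Int × Int) status =>
          if status = "PASS" then (acc.1 + 1, acc.2.1, acc.2.2)
          else if status = "FAIL" ∨ status = "ERROR" then (acc.1, acc.2.1 + 1, acc.2.2)
          else if status = "WARN" then (acc.1, acc.2.1, acc.2.2 + 1)
          else acc) ((0 : Int), (0 : Int), (0 : Int)))
      = (results.foldl
        (fun (acc : Int × Int × Int) result =>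
          let status := pvNorm result
          if status = "PASS" then (acc.1 + 1, acc.2.1, acc.2.2)
          else if status = "FAIL" ∨ status = "ERROR" then (acc.1, acc.2.1 + 1, acc.2.2)
          else if status = "WARN" then (acc.1, acc.2.1, acc.2.2 + 1)
          else acc) ((0 : Int), (0 : Int), (0 : Int))) := by
      rw [List.foldl_map]
    replace this := this.symm
    rw [show (results.foldl
        (fun (acc : Int × Int × Int) result =>
          let status := pvNorm result
          if status = "PASS" then (acc.1 + 1, acc.2.1, acc.2.2)
          else if status = "FAIL" ∨ status = "ERROR" then (acc.1, acc.2.1 + 1, acc.2.2)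
          else if status = "WARN" then (acc.1, acc.2.1, acc.2.2 + 1)
          else acc) ((0 : Int), (0 : Int), (0 : Int)))
      = ((results.map pvNorm).foldl
        (fun (acc : Int × Int × Int) status =>
          if status = "PASS" then (acc.1 + 1, acc.2.1, acc.2.2)
          else if status = "FAIL" ∨ status = "ERROR" then (acc.1, acc.2.1 + 1, acc.2.2)
          else if status = "WARN" then (acc.1, acc.2.1, acc.2.2 + 1)
          else acc) ((0 : Int), (0 : Int), (0 : Int))) from this, afold_counts]
    simp
  have hB :
      results.foldl
        (fun (d : PySem.Dict String Int) result =>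
          let s := pvNorm result
          d.insert s (d.getD s 0 + 1)) PySem.Dict.empty
      = PySem.Dict.counter (results.map pvNorm) := by
    have : ((results.map pvNorm).foldl
        (fun (d : PySem.Dict String Int) s => d.insert s (d.getD s 0 + 1))
        PySem.Dict.empty)
      = (results.foldl
        (fun (d : PySem.Dict String Int) result =>
          let s := pvNorm result
          d.insert s (d.getD s 0 + 1)) PySem.Dict.empty) := by
      rw [List.foldl_map]
    replace this := this.symm
    rw [show (results.foldl
        (fun (d : PySem.Dict String Int) result =>
          let s := pvNorm result
          d.insert s (d.getD s 0 + 1)) PySem.Dict.empty)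
      = ((results.map pvNorm).foldl
        (fun (d : PySem.Dict String Int) s => d.insert s (d.getD s 0 + 1))
        PySem.Dict.empty) from this,
      PySem.Dict.foldl_insert_getD_add_one_eq_counter]
  rw [show (fun (acc : Int × Int × Int) result =>
        let status := PySem.Str.upper ((PySem.Dict.mk result).getD "status" "")
        if status = "PASS" then (acc.1 + 1, acc.2.1, acc.2.2)
        else if status = "FAIL" ∨ status = "ERROR" then (acc.1, acc.2.1 + 1, acc.2.2)
        else if status = "WARN" then (acc.1, acc.2.1, acc.2.2 + 1)
        else acc)
      = (fun (acc : Int × Int × Int) result =>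
          let status := pvNorm result
          if status = "PASS" then (acc.1 + 1, acc.2.1, acc.2.2)
          else if status = "FAIL" ∨ status = "ERROR" then (acc.1, acc.2.1 + 1, acc.2.2)
          else if status = "WARN" then (acc.1, acc.2.1, acc.2.2 + 1)
          else acc) from rfl,
    show (fun (d : PySem.Dict String Int) result =>
        let s := PySem.Str.upper ((PySem.Dict.mk result).getD "status" "")
        d.insert s (d.getD s 0 + 1))
      = (fun (d : PySem.Dict String Int) result =>
          let s := pvNorm result
          d.insert s (d.getD s 0 + 1)) from rfl]
  rw [hA, hB]
  simp [PySem.Dict.getD_counter]
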